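-- pv_equiv track=rewrite | github.com/sahn54/CSCI381-Python | final/Practice_6.py | triangle_numbers
-- ===== SOURCE A (Python) =====
-- def triangle_numbers(num):
--     value = 1
--     adding_value = 2
--     while num > 0:
--         yield value
--         value += adding_value
--         adding_value += 1
--         num -= 1
-- ===== SOURCE B (Python) =====
-- def triangle_numbers(num):
--     yield from (k * (k + 1) // 2 for k in range(1, num + 1))
-- ===== Notes on version B (the rewrite author's own statement) =====
-- stated objective: simpler
-- what changed: B replaces A's while-loop with two coupled running accumulators by a single generator expression mapping the closed-form triangle formula over a range of indices.
import Mathlib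
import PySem

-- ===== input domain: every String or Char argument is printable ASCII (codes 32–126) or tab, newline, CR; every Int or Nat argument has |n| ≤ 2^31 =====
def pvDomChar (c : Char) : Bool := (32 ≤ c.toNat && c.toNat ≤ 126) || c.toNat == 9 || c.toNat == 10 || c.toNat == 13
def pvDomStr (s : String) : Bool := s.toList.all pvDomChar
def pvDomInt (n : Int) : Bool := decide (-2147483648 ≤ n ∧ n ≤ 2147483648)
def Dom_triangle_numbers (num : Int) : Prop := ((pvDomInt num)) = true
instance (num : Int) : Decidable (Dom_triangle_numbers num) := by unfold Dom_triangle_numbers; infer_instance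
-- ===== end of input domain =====

-- B replaces A's two coupled running accumulators with a closed-form map over range(1, num+1) (simpler).


-- ===== PORT A =====
-- while num > 0: yield value; value += adding_value; adding_value += 1; num -= 1
-- (fuel = num.toNat counts the remaining iterations exactly)
def triangleA_loop (fuel : Nat) (value adding_value : Int) : List Int :=
  match fuel with
  | 0 => []
  | n + 1 => value :: triangleA_loop n (value + adding_value) (adding_value + 1)

def triangle_numbers (num : Int) : List Int :=
  triangleA_loop num.toNat 1 2

-- ===== PORT B =====
-- yield from (k*(k+1)//2 for k in range(1, num+1))
def triangle_numbers_alt (num : Int) : List Int :=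
  (PySem.List.pyRange 1 (num + 1) 1).map (fun k => PySem.Int.floordiv (k * (k + 1)) 2)

-- ===== PRECONDITION & SPEC =====
def Spec_triangle_numbers (num : Int) (out : List Int) : Prop := out = triangle_numbers_alt num
instance (num : Int) (out : List Int) : Decidable (Spec_triangle_numbers num out) := by unfold Spec_triangle_numbers; infer_instance

-- ===== CLAIM (what is proved, stated in full; the proofs are below) =====
def Claim_equal_triangle_numbers : Prop := ∀ (num : Int), Dom_triangle_numbers num → Spec_triangle_numbers num (triangle_numbers num)

-- ===== LEMMAS AND PROOFS =====

-- invariant: A's state at start index i ≥ 1 is value = T_i (2*value = i*(i+1)), adding_value = i+1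
theorem triangleA_loop_eq_map (n : Nat) (i v : Int) (hi : 1 ≤ i) (hv : 2 * v = i * (i + 1)) :
    triangleA_loop n v (i + 1)
      = (List.range n).map (fun (k : Nat) => PySem.Int.floordiv ((i + (k : Int)) * (i + (k : Int) + 1)) 2) := by
  induction n generalizing i v with
  | zero => rfl
  | succ n ih =>
    rw [List.range_succ_eq_map, List.map_cons, List.map_map]
    simp only [triangleA_loop]
    congr 1
    · rw [PySem.Int.floordiv_eq_ediv_of_pos (by omega)]
      have h0 : (i + ((0 : Nat) : Int)) = i := by push_cast; ring
      rw [h0, ← hv]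
      omega
    · rw [ih (i + 1) (v + (i + 1)) (by omega) (by linear_combination hv)]
      apply List.map_congr_left
      intro k _
      simp only [Function.comp]
      congr 2 <;> push_cast <;> ring

-- ===== VERDICT (by name: the statement is the Claim_ definition above) =====
theorem triangle_numbers_spec : Claim_equal_triangle_numbers := by
  intro num _
  show triangle_numbers num = triangle_numbers_alt num
  unfold triangle_numbers triangle_numbers_alt
  rw [PySem.List.pyRange_one, List.map_map]
  have h2 : (num + 1 - 1).toNat = num.toNat := by omega
  have h := triangleA_loop_eq_map num.toNat 1 1 le_rfl (by ring)
  rw [h2, show (2 : Int) = 1 + 1 from rfl, h]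
  apply List.map_congr_left
  intro k _
  simp only [Function.comp]
  congr 2
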